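-- pv_equiv track=rewrite | github.com/2021-software-project/mbti-based-job-recommend | mbti_to_columns.py | mbti_to_col
-- ===== SOURCE A (Python) =====
-- def mbti_to_col(data):
--     d = [0 for _ in range(8)]
--     for element in data:
--         if (element == 'E'):
--             d[0] = 1
--         elif (element == 'S'):
--             d[1] = 1
--         elif (element == 'T'):
--             d[2] = 1
--         elif (element == 'J'):
--             d[3] = 1
--         elif (element == 'I'):
--             d[4] = 1
--         elif (element == 'N'):
--             d[5] = 1
--         elif (element == 'F'):
--             d[6] = 1
--         elif (element == 'P'):
--             d[7] = 1
--     return d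
-- ===== SOURCE B (Python) =====
-- def mbti_to_col(data):
--     return [1 if letter in data else 0 for letter in "ESTJINFP"]
-- ===== Notes on version B (the rewrite author's own statement) =====
-- stated objective: idiomatic
-- what changed: Instead of initialising an 8-slot array and setting slots while scanning the input once with an 8-way branch per element, B builds the vector directly as a comprehension over the fixed eight-letter order with one membership probe of the input per letter.
import Mathlib
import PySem

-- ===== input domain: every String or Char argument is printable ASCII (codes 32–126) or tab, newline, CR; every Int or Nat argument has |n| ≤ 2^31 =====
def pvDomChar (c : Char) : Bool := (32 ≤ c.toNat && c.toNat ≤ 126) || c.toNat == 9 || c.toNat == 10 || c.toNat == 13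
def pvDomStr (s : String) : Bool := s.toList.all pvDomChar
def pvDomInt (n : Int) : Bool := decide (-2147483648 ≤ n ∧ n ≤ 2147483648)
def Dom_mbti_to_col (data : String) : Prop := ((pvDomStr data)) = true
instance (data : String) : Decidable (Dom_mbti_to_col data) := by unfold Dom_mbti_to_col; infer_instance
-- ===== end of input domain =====

-- B replaces A's slot-setting scan by a comprehension over the fixed letter order (objective: idiomatic).
-- ===== PORT A =====
def mbtiStep (d : List Int) (element : Char) : List Int :=
  if element = 'E' then d.set 0 1
  else if element = 'S' then d.set 1 1
  else if element = 'T' then d.set 2 1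
  else if element = 'J' then d.set 3 1
  else if element = 'I' then d.set 4 1
  else if element = 'N' then d.set 5 1
  else if element = 'F' then d.set 6 1
  else if element = 'P' then d.set 7 1
  else d

def mbti_to_col (data : String) : List Int :=
  data.toList.foldl mbtiStep (List.replicate 8 0)

-- ===== PORT B =====
def mbti_to_col_alt (data : String) : List Int :=
  "ESTJINFP".toList.map (fun letter => if letter ∈ data.toList then (1 : Int) else 0)

-- ===== PRECONDITION & SPEC =====
def Spec_mbti_to_col (data : String) (out : List Int) : Prop := out = mbti_to_col_alt data
instance (data : String) (out : List Int) : Decidable (Spec_mbti_to_col data out) := by unfold Spec_mbti_to_col; infer_instance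

-- ===== CLAIM (what is proved, stated in full; the proofs are below) =====
def Claim_equal_mbti_to_col : Prop := ∀ (data : String), Dom_mbti_to_col data → Spec_mbti_to_col data (mbti_to_col data)

-- ===== LEMMAS AND PROOFS =====
def mbtiMark (ch : Char) (v : Int) (xs : List Char) : Int := if ch ∈ xs then 1 else v

theorem mbti_fold_char (xs : List Char) :
    ∀ (a b c d e f g h : Int),
      xs.foldl mbtiStep [a, b, c, d, e, f, g, h] =
        [mbtiMark 'E' a xs, mbtiMark 'S' b xs, mbtiMark 'T' c xs, mbtiMark 'J' d xs,
         mbtiMark 'I' e xs, mbtiMark 'N' f xs, mbtiMark 'F' g xs, mbtiMark 'P' h xs] := by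
  induction xs with
  | nil => intro a b c d e f g h; simp [mbtiMark]
  | cons x xs ih =>
    intro a b c d e f g h
    simp only [List.foldl_cons, mbtiStep]
    split_ifs with h1 h2 h3 h4 h5 h6 h7 h8 <;>
      (try simp only [List.set_cons_zero, List.set_cons_succ]) <;>
      rw [ih] <;>
      simp [mbtiMark, List.mem_cons, eq_comm, *]

-- ===== VERDICT (by name: the statement is the Claim_ definition above) =====
theorem mbti_to_col_spec : Claim_equal_mbti_to_col := by
  intro data _
  show mbti_to_col data = mbti_to_col_alt data
  have hlit : ("ESTJINFP".toList) = ['E','S','T','J','I','N','F','P'] := by decide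
  simp only [mbti_to_col, mbti_to_col_alt, hlit, List.map]
  have := mbti_fold_char data.toList 0 0 0 0 0 0 0 0
  simp only [List.replicate] at *
  rw [this]
  simp [mbtiMark]
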